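-- pv_equiv track=rewrite | github.com/Maxi1324/TetrisAI3 | Scripts/dings.py | calcRotBlock
-- ===== SOURCE A (Python) =====
-- def calcRotBlock(rot,block):
--   rotatedBlock = [[0,0,0,0],[0,0,0,0],[0,0,0,0],[0,0,0,0]]
--   for i in range(0,4):
--     for j in range(0, 4):
--           x = i
--           y = j
--           if rot == 1:
--             x = j
--             y = 3-i
--           elif rot == 2:
--             x = 3-i
--             y = 3-j
--           elif rot == 3:
--             x = 3-j
--             y = i
--           rotatedBlock[i][j] = block[x][y]
--   return rotatedBlock
-- ===== SOURCE B (Python) =====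
-- def calcRotBlock(rot, block):
--     n = {1: 1, 2: 2, 3: 3}.get(rot, 0)
--     grid = [[block[i][j] for j in range(4)] for i in range(4)]
--     for _ in range(n):
--         grid = [[grid[j][3 - i] for j in range(4)] for i in range(4)]
--     return grid
-- ===== Notes on version B (the rewrite author's own statement) =====
-- stated objective: simpler
-- what changed: B replaces A's per-cell four-way branch on rot by one clockwise 90-degree step applied n times (n = 1/2/3 for rot 1/2/3, else 0) to a copied top-left 4x4 grid, with no mutation or index case analysis.
import Mathlib
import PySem

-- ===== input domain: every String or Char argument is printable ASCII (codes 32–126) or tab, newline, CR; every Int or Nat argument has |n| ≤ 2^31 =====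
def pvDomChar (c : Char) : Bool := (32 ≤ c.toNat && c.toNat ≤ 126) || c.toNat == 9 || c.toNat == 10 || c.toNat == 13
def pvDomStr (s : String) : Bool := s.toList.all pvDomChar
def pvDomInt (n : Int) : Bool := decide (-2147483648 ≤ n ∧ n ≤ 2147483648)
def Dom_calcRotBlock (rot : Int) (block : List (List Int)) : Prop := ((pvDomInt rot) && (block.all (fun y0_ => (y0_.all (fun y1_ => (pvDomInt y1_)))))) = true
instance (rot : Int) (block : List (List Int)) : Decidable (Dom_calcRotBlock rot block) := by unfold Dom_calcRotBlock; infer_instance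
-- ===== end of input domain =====

-- B applies a single clockwise 90° step n times (n = 1/2/3 for rot 1/2/3, else 0) to a
-- copied top-left 4x4 grid, replacing A's per-cell four-way index branch; objective: simpler.

-- ===== PORT A =====
-- block[x][y] (nonnegative literal indices) via pyGet?; .getD 0 is never reached inside Pre_.
def pvCellA (block : List (List Int)) (x y : Nat) : Int :=
  (PySem.List.pyGet? ((PySem.List.pyGet? block (x : Int)).getD []) (y : Int)).getD 0

def calcRotBlock (rot : Int) (block : List (List Int)) : List (List Int) :=
  let rotatedBlock : List (List Int) := [[0,0,0,0],[0,0,0,0],[0,0,0,0],[0,0,0,0]]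
  (List.range 4).foldl (fun rb i =>
    (List.range 4).foldl (fun rb j =>
      let x := i
      let y := j
      let xy : Nat × Nat :=
        if rot = 1 then (j, 3 - i)
        else if rot = 2 then (3 - i, 3 - j)
        else if rot = 3 then (3 - j, i)
        else (x, y)
      rb.modify i (fun row => row.set j (pvCellA block xy.1 xy.2))) rb) rotatedBlock

-- ===== PORT B =====
-- in-range lookup (B only ever indexes inside the 4x4 grid / the first 4x4 of block)
def pvCellB (g : List (List Int)) (i j : Nat) : Int := (g.getD i []).getD j 0

-- one clockwise 90° step: r(g)[i][j] = g[j][3-i]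
def pvStepB (g : List (List Int)) : List (List Int) :=
  (List.range 4).map (fun i => (List.range 4).map (fun j => pvCellB g j (3 - i)))

def calcRotBlock_alt (rot : Int) (block : List (List Int)) : List (List Int) :=
  let n : Nat := if rot = 1 then 1 else if rot = 2 then 2 else if rot = 3 then 3 else 0
  let grid := (List.range 4).map (fun i => (List.range 4).map (fun j => pvCellB block i j))
  pvStepB^[n] grid

-- ===== PRECONDITION & SPEC =====
-- Pre_ excludes exactly the inputs where Python A raises IndexError: blocks with fewer
-- than 4 rows, or one of the first 4 rows shorter than 4.
def Pre_calcRotBlock (_rot : Int) (block : List (List Int)) : Prop :=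
  4 ≤ block.length ∧ ∀ row ∈ block.take 4, 4 ≤ row.length
instance (rot : Int) (block : List (List Int)) : Decidable (Pre_calcRotBlock rot block) := by
  unfold Pre_calcRotBlock; infer_instance

def pvWitness_calcRotBlock : Int × List (List Int) :=
  (1, [[1,2,3,4],[5,6,7,8],[9,10,11,12],[13,14,15,16]])

def Spec_calcRotBlock (rot : Int) (block : List (List Int)) (out : List (List Int)) : Prop := out = calcRotBlock_alt rot block
instance (rot : Int) (block : List (List Int)) (out : List (List Int)) : Decidable (Spec_calcRotBlock rot block out) := by unfold Spec_calcRotBlock; infer_instance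

-- ===== CLAIM (what is proved, stated in full; the proofs are below) =====
def Claim_equal_calcRotBlock : Prop := ∀ (rot : Int) (block : List (List Int)), Dom_calcRotBlock rot block → Pre_calcRotBlock rot block → Spec_calcRotBlock rot block (calcRotBlock rot block)

-- ===== LEMMAS AND PROOFS =====

-- ===== VERDICT (by name: the statement is the Claim_ definition above) =====
theorem calcRotBlock_spec : Claim_equal_calcRotBlock := by
  intro rot block _ hpre
  obtain ⟨hlen, hrow⟩ := hpre
  match block, hlen with
  | r0 :: r1 :: r2 :: r3 :: rest, _ =>
    have h0 := hrow r0 (by simp [List.take])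
    have h1 := hrow r1 (by simp [List.take])
    have h2 := hrow r2 (by simp [List.take])
    have h3 := hrow r3 (by simp [List.take])
    match r0, h0 with
    | a0::a1::a2::a3::t0, _ =>
    match r1, h1 with
    | b0::b1::b2::b3::t1, _ =>
    match r2, h2 with
    | c0::c1::c2::c3::t2, _ =>
    match r3, h3 with
    | d0::d1::d2::d3::t3, _ =>
      unfold Spec_calcRotBlock
      by_cases e1 : rot = 1
      · subst e1; simp [calcRotBlock, calcRotBlock_alt, pvCellA, pvCellB, pvStepB,
                  List.range_succ, List.modify]
      · by_cases e2 : rot = 2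
        · subst e2; simp [calcRotBlock, calcRotBlock_alt, pvCellA, pvCellB, pvStepB,
                  List.range_succ, List.modify]
        · by_cases e3 : rot = 3
          · subst e3; simp [calcRotBlock, calcRotBlock_alt, pvCellA, pvCellB, pvStepB,
                  List.range_succ, List.modify]
          · simp [calcRotBlock, calcRotBlock_alt, e1, e2, e3, pvCellA, pvCellB, pvStepB,
                  List.range_succ, List.modify]
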